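-- pv_equiv track=rewrite | github.com/LukasPrenner/TU_water-dashboard_app | water-dashboard_app.py | extract_project
-- ===== SOURCE A (Python) =====
-- def extract_project(table_list):
--     project_tables_dict = {}
--     for table in table_list:
--         if table.split('__')[0] in project_tables_dict:
--             temp_list = []
--             if isinstance(project_tables_dict[table.split('__')[0]],list):
--                 project_tables_dict[table.split('__')[0]].append(table.split('__')[1])
--         else:
--             project_tables_dict[table.split('__')[0]] = [table.split('__')[1]]
--     return project_tables_dict
-- ===== SOURCE B (Python) =====
-- def extract_project(table_list):
--     parts = [t.split('__') for t in table_list]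
--     return {k: [p[1] for p in parts if p[0] == k]
--             for k in dict.fromkeys(p[0] for p in parts)}
-- ===== Notes on version B (the rewrite author's own statement) =====
-- stated objective: idiomatic
-- what changed: A grows a dict incrementally, appending each suffix while iterating; B splits all tables once, then builds the result in one comprehension keyed by the ordered deduplicated prefixes, collecting each key's suffixes with a per-key scan.
import Mathlib
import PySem

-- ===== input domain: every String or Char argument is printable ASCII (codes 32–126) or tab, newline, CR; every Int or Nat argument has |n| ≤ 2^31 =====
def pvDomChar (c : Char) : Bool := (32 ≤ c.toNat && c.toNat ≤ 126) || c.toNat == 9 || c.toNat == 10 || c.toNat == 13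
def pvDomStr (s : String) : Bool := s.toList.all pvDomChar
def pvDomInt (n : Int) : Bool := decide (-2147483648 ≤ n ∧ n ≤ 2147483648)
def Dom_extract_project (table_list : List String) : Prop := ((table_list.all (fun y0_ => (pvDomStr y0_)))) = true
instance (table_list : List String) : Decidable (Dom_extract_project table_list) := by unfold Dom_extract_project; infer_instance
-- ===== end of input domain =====

-- B groups suffixes by prefix via one split pass + an ordered-distinct-prefix comprehension
-- instead of A's incremental dict mutation; same return value on every input where A returns.


-- ===== PORT A =====
-- t.split('__'): the separator "__" is nonempty, so Str.split? always returns some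
def pvParts (t : String) : List String := (PySem.Str.split? t "__").getD []

def extract_project (table_list : List String) : List (String × List String) :=
  (table_list.foldl (fun d t =>
    -- table.split('__')[0]; split never returns an empty list, so index 0 is safe
    let k := (PySem.List.pyGet? (pvParts t) 0).getD ""
    if d.contains k then
      -- temp_list = [] is dead code; isinstance(…, list) is always true (values are lists)
      match PySem.List.pyGet? (pvParts t) 1 with
      | some s => d.modify k [] (fun v => v ++ [s])   -- project_tables_dict[…].append(…)
      | none   => d                                    -- IndexError: excluded by Pre_
    else
      match PySem.List.pyGet? (pvParts t) 1 with
      | some s => d.insert k [s]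
      | none   => d                                    -- IndexError: excluded by Pre_
  ) PySem.Dict.empty).items

-- ===== PORT B =====
def extract_project_alt (table_list : List String) : List (String × List String) :=
  let parts := table_list.map pvParts
  -- dict.fromkeys(p[0] for p in parts) = ordered dedup of the prefixes
  let keys := PySem.List.dedup (parts.map (fun p => (PySem.List.pyGet? p 0).getD ""))
  keys.map (fun k => (k,
    (parts.filter (fun p => (PySem.List.pyGet? p 0).getD "" == k)).map
      (fun p => (PySem.List.pyGet? p 1).getD "")))

-- ===== PRECONDITION & SPEC =====
-- Pre_: every table splits into at least two pieces on '__' (i.e. contains '__');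
-- on a table without '__' both Pythons raise IndexError on split('__')[1].
def Pre_extract_project (table_list : List String) : Prop :=
  ∀ t ∈ table_list, 2 ≤ (pvParts t).length
instance (table_list : List String) : Decidable (Pre_extract_project table_list) := by unfold Pre_extract_project; infer_instance

def pvWitness_extract_project : List String := ["proj__users", "proj__sites", "other__x", "proj__users"]

def Spec_extract_project (table_list : List String) (out : List (String × List String)) : Prop := out = extract_project_alt table_list
instance (table_list : List String) (out : List (String × List String)) : Decidable (Spec_extract_project table_list out) := by unfold Spec_extract_project; infer_instance

-- ===== CLAIM (what is proved, stated in full; the proofs are below) =====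
def Claim_equal_extract_project : Prop := ∀ (table_list : List String), Dom_extract_project table_list → Pre_extract_project table_list → Spec_extract_project table_list (extract_project table_list)

-- ===== LEMMAS AND PROOFS =====

def pvKey (t : String) : String := (PySem.List.pyGet? (pvParts t) 0).getD ""
def pvSuf (t : String) : String := (PySem.List.pyGet? (pvParts t) 1).getD ""

-- Under Pre_, A's loop body is exactly "append pvSuf t to the entry at pvKey t"
theorem pv_step_eq (d : PySem.Dict String (List String)) (t : String)
    (h : 2 ≤ (pvParts t).length) :
    (let k := (PySem.List.pyGet? (pvParts t) 0).getD ""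
     if d.contains k then
       match PySem.List.pyGet? (pvParts t) 1 with
       | some s => d.modify k [] (fun v => v ++ [s])
       | none   => d
     else
       match PySem.List.pyGet? (pvParts t) 1 with
       | some s => d.insert k [s]
       | none   => d)
    = d.modify (pvKey t) [] (fun v => v ++ [pvSuf t]) := by
  have h1 : PySem.List.pyGet? (pvParts t) 1 = some ((pvParts t)[1]'(by omega)) := by
    have h2 := PySem.List.pyGet?_natCast (pvParts t) 1
    rw [List.getElem?_eq_getElem (by omega)] at h2
    simpa using h2
  simp only [h1, pvKey, pvSuf]
  split
  · rfl
  · next hc =>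
    simp only [PySem.Dict.modify,
      PySem.Dict.getD_of_not_contains _ _ (by simpa using hc)]
    rfl

theorem extract_project_eq_group (table_list : List String)
    (hpre : Pre_extract_project table_list) :
    extract_project table_list =
      (PySem.List.dedup (table_list.map pvKey)).map (fun k => (k,
        ((table_list.map (fun t => (pvKey t, pvSuf t))).filter (fun p => p.1 == k)).map (·.2))) := by
  unfold extract_project
  rw [PySem.List.foldl_congr_mem _ _
      (fun d t => d.modify (pvKey t) [] (fun v => v ++ [pvSuf t])) _
      (fun d t ht => pv_step_eq d t (hpre t ht))]
  have hnd : (table_list.foldl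
      (fun d t => d.modify (pvKey t) [] (fun v => v ++ [pvSuf t]))
      PySem.Dict.empty).keys.Nodup := by
    exact PySem.Dict.nodup_keys_foldl_modify_key table_list pvKey []
      (fun _ t v => v ++ [pvSuf t]) PySem.Dict.empty (by simp)
  rw [PySem.Dict.items_eq_map_keys _ hnd []]
  have hkeys : (table_list.foldl
      (fun d t => d.modify (pvKey t) [] (fun v => v ++ [pvSuf t]))
      PySem.Dict.empty).keys = PySem.List.dedup (table_list.map pvKey) := by
    rw [PySem.Dict.keys_foldl_modify_key table_list pvKey []
      (fun _ t v => v ++ [pvSuf t]) PySem.Dict.empty]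
    simp [PySem.Set.update, PySem.Set.ofList_eq_foldl, PySem.Dict.keys, PySem.Dict.empty]
  rw [hkeys]
  apply List.map_congr_left
  intro k _
  have hfold : (table_list.foldl
      (fun d t => d.modify (pvKey t) [] (fun v => v ++ [pvSuf t]))
      PySem.Dict.empty)
      = ((table_list.map (fun t => (pvKey t, pvSuf t))).foldl
          (fun d p => d.modify p.1 [] (fun v => v ++ [p.2])) PySem.Dict.empty) := by
    rw [List.foldl_map]
  rw [hfold, PySem.Dict.getD_foldl_modify_append]
  simp

theorem extract_project_alt_eq_group (table_list : List String) :
    extract_project_alt table_list =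
      (PySem.List.dedup (table_list.map pvKey)).map (fun k => (k,
        ((table_list.map (fun t => (pvKey t, pvSuf t))).filter (fun p => p.1 == k)).map (·.2))) := by
  unfold extract_project_alt
  simp only [List.map_map, List.filter_map]
  rfl

-- ===== VERDICT (by name: the statement is the Claim_ definition above) =====
theorem extract_project_spec : Claim_equal_extract_project := by
  intro table_list _ hpre
  unfold Spec_extract_project
  rw [extract_project_eq_group table_list hpre, extract_project_alt_eq_group]
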